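-- pv_equiv track=rewrite | github.com/HappyFX/ansible_audit_module | playbook/audit_pckg/library/compare_facts.py | compare_hosts
-- ===== SOURCE A (Python) =====
-- def compare_hosts(data: dict) -> dict:
--   count = len(data.keys())
--   result = {}
--   for host, values in data.items():
--     for module_type, module_values in values.items():
--       result.setdefault(module_type, {})
--       for key, info in module_values.items():
--         result[module_type].setdefault(key, {})
--         result[module_type][key].setdefault(info, [])
--         result[module_type][key][info].append(host)
--         if len(result[module_type][key][info]) == count:
--           del result[module_type][key]
--   return result
-- ===== SOURCE B (Python) =====
-- def compare_hosts(data: dict) -> dict: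
--   n = len(data)
--   index = {}
--   for host, values in data.items():
--     for module_type, module_values in values.items():
--       mod = index.setdefault(module_type, {})
--       for key, info in module_values.items():
--         mod.setdefault(key, {}).setdefault(info, []).append(host)
--   return {module_type: {key: vals for key, vals in keys.items()
--                         if all(len(hosts) < n for hosts in vals.values())}
--           for module_type, keys in index.items()}
-- ===== Notes on version B (the rewrite author's own statement) =====
-- stated objective: simpler
-- what changed: B builds the complete host index in one pure pass with no deletions and then drops universal keys in a separate comprehension filter, instead of A's single pass that checks the list length after every append and deletes mid-iteration.
import Mathlib
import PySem

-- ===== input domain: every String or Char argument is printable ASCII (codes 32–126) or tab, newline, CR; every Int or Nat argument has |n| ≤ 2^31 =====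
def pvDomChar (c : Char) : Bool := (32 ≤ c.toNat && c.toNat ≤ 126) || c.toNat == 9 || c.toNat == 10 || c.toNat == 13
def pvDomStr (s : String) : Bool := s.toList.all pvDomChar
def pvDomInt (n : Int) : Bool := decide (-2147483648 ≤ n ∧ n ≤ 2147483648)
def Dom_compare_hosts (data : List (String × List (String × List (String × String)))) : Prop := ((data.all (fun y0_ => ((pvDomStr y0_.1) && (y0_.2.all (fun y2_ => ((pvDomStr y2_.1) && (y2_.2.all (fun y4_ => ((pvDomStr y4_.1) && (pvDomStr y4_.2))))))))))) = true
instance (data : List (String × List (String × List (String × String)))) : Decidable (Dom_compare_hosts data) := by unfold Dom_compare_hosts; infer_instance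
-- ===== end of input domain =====

-- B rewrites A's single pass (which checks the hosts-list length after every append and deletes
-- universal keys mid-iteration) as a pure index-building pass followed by a separate filter pass.

-- ===== PORT A =====
def compare_hosts (data : List (String × List (String × List (String × String)))) : List (String × List (String × List (String × List String))) :=
  let count := data.length
  let result : PySem.Dict String (PySem.Dict String (PySem.Dict String (List String))) :=
    data.foldl (fun result hv =>
      hv.2.foldl (fun result mv =>
        let result := result.setdefault mv.1 PySem.Dict.empty
        mv.2.foldl (fun result kv =>
          let md := (result.getD mv.1 PySem.Dict.empty).setdefault kv.1 PySem.Dict.empty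
          let result := result.insert mv.1 md
          let vd := (md.getD kv.1 PySem.Dict.empty).setdefault kv.2 []
          let md := md.insert kv.1 vd
          let result := result.insert mv.1 md
          let lst := vd.getD kv.2 [] ++ [hv.1]
          let vd := vd.insert kv.2 lst
          let md := md.insert kv.1 vd
          let result := result.insert mv.1 md
          if lst.length = count then
            result.insert mv.1 ((result.getD mv.1 PySem.Dict.empty).erase kv.1)
          else result) result) result) PySem.Dict.empty
  result.items.map (fun p => (p.1, p.2.items.map (fun q => (q.1, q.2.items))))

-- ===== PORT B =====
def compare_hosts_alt (data : List (String × List (String × List (String × String)))) : List (String × List (String × List (String × List String))) :=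
  let n := data.length
  let index : PySem.Dict String (PySem.Dict String (PySem.Dict String (List String))) :=
    data.foldl (fun index hv =>
      hv.2.foldl (fun index mv =>
        let index := index.setdefault mv.1 PySem.Dict.empty
        let mod := mv.2.foldl (fun mod kv =>
          mod.insert kv.1 ((mod.getD kv.1 PySem.Dict.empty).insert kv.2
            ((mod.getD kv.1 PySem.Dict.empty).getD kv.2 [] ++ [hv.1]))) (index.getD mv.1 PySem.Dict.empty)
        index.insert mv.1 mod) index) PySem.Dict.empty
  index.items.map (fun p => (p.1,
    (p.2.items.filter (fun q => q.2.values.all (fun hosts => hosts.length < n))).map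
      (fun q => (q.1, q.2.items))))

-- ===== PRECONDITION & SPEC =====
-- Pre_ only states that the association lists encode Python dicts: the inner dicts (a host's
-- modules, a module's keys) have pairwise-distinct keys, as any actual Python input has.
-- It excludes no input the Python function can receive.
def Pre_compare_hosts (data : List (String × List (String × List (String × String)))) : Prop :=
  ∀ hv ∈ data, (hv.2.map Prod.fst).Nodup ∧ ∀ mv ∈ hv.2, (mv.2.map Prod.fst).Nodup
instance (data : List (String × List (String × List (String × String)))) : Decidable (Pre_compare_hosts data) := by unfold Pre_compare_hosts; infer_instance

def pvWitness_compare_hosts : (List (String × List (String × List (String × String)))) :=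
  [("h1", [("m", [("k", "v")])]), ("h2", [("m", [("k", "w")])])]

def Spec_compare_hosts (data : List (String × List (String × List (String × String)))) (out : List (String × List (String × List (String × List String)))) : Prop := out = compare_hosts_alt data
instance (data : List (String × List (String × List (String × String)))) (out : List (String × List (String × List (String × List String)))) : Decidable (Spec_compare_hosts data out) := by unfold Spec_compare_hosts; infer_instance

-- ===== CLAIM (what is proved, stated in full; the proofs are below) =====
def Claim_equal_compare_hosts : Prop := ∀ (data : List (String × List (String × List (String × String)))), Dom_compare_hosts data → Pre_compare_hosts data → Spec_compare_hosts data (compare_hosts data)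

-- ===== LEMMAS AND PROOFS =====

abbrev PVVD := PySem.Dict String (List String)
abbrev PVKD := PySem.Dict String PVVD
abbrev PVMD := PySem.Dict String PVKD

-- the body of A's innermost loop, as a named function
def pairStepA (count : Nat) (host mt : String) (result : PVMD) (kv : String × String) : PVMD :=
  let md := (result.getD mt PySem.Dict.empty).setdefault kv.1 PySem.Dict.empty
  let result := result.insert mt md
  let vd := (md.getD kv.1 PySem.Dict.empty).setdefault kv.2 []
  let md := md.insert kv.1 vd
  let result := result.insert mt md
  let lst := vd.getD kv.2 [] ++ [host]
  let vd := vd.insert kv.2 lst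
  let md := md.insert kv.1 vd
  let result := result.insert mt md
  if lst.length = count then
    result.insert mt ((result.getD mt PySem.Dict.empty).erase kv.1)
  else result

-- the body of B's innermost loop, as a named function
def mdStepB (host : String) (mod : PVKD) (kv : String × String) : PVKD :=
  mod.insert kv.1 ((mod.getD kv.1 PySem.Dict.empty).insert kv.2
    ((mod.getD kv.1 PySem.Dict.empty).getD kv.2 [] ++ [host]))

-- reference pure step, lifted to the whole outer dict
def pairStepP (host mt : String) (r : PVMD) (kv : String × String) : PVMD :=
  r.insert mt (mdStepB host (r.getD mt PySem.Dict.empty) kv)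

def modStepP (host : String) (r : PVMD) (mv : String × List (String × String)) : PVMD :=
  mv.2.foldl (pairStepP host mv.1) (r.setdefault mv.1 PySem.Dict.empty)

def pureIdx (data : List (String × List (String × List (String × String)))) : PVMD :=
  data.foldl (fun r hv => hv.2.foldl (modStepP hv.1) r) PySem.Dict.empty

def keepB (n : Nat) (vd : PVVD) : Bool := vd.values.all (fun hs => hs.length < n)
def fKD (n : Nat) (kd : PVKD) : PVKD := PySem.Dict.mk (kd.items.filter (fun q => keepB n q.2))
def FMD (n : Nat) (r : PVMD) : PVMD := PySem.Dict.mk (r.items.map (fun p => (p.1, fKD n p.2)))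

def NodAll (r : PVMD) : Prop := r.keys.Nodup ∧ ∀ p ∈ r.items, p.2.keys.Nodup
def AllL (r : PVMD) (m : Nat) : Prop :=
  ∀ p ∈ r.items, ∀ q ∈ p.2.items, ∀ w ∈ q.2.items, w.2.length ≤ m

-- generic dict lemmas (String keys)
theorem pv_erase_insert_self {ν : Type} (d : PySem.Dict String ν) (k : String) (v : ν) :
    (d.insert k v).erase k = d.erase k := by
  cases h : d.contains k
  · simp [PySem.Dict.insert, PySem.Dict.erase, h, List.filter_append]
  · simp only [PySem.Dict.insert, PySem.Dict.erase, h, if_true, List.filter_map]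
    congr 1
    rw [List.filter_congr (q := fun p => !(p.1 == k)) ?_]
    · rw [List.map_congr_left ?_, List.map_id]
      intro p hp
      have hne : (p.1 == k) = false := by
        have := List.of_mem_filter hp; simpa using this
      simp [hne]
    · intro p _
      by_cases hp : p.1 = k <;> simp [hp]

theorem pv_setdefault_insert_self {ν : Type} (d : PySem.Dict String ν) (k : String) (v0 w : ν) :
    (d.setdefault k v0).insert k w = d.insert k w := by
  cases h : d.contains k
  · have hfk : ∀ p ∈ d.items, (p.1 == k) = false := by
      intro p hp
      by_contra hc
      have : d.contains k = true := by
        simp only [PySem.Dict.contains, List.any_eq_true]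
        exact ⟨p, hp, by simpa using hc⟩
      simp [this] at h
    have hc2 : (PySem.Dict.mk (d.items ++ [(k, v0)]) : PySem.Dict String ν).contains k = true := by
      simp [PySem.Dict.contains]
    simp only [PySem.Dict.setdefault, h, Bool.false_eq_true, if_false]
    simp only [PySem.Dict.insert, hc2, h, if_true, Bool.false_eq_true, if_false]
    congr 1
    rw [List.map_append]
    simp only [List.map_cons, List.map_nil, BEq.rfl, if_true]
    congr 1
    rw [List.map_congr_left ?_, List.map_id]
    intro p hp
    simp [hfk p hp]
  · simp [PySem.Dict.setdefault, h]

theorem pv_insert_getD_self {ν : Type} (d : PySem.Dict String ν) (k : String) (dflt : ν)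
    (h : d.contains k = true) (hnd : d.keys.Nodup) : d.insert k (d.getD k dflt) = d := by
  apply PySem.Dict.ext
  simp only [PySem.Dict.insert, h, if_true]
  rw [List.map_congr_left ?_, List.map_id]
  intro p hp
  by_cases hpk : p.1 = k
  · have hget : d.get? k = some p.2 := by
      apply PySem.Dict.get?_of_mem_items d ?_ hnd
      rw [← hpk]; exact hp
    have hgd : d.getD k dflt = p.2 := by simp [PySem.Dict.getD, hget]
    simp only [hpk, BEq.rfl, if_true, hgd]
    simp [hpk.symm]
  · simp [hpk]

theorem pv_get?_mapSnd {α β : Type} (l : List (String × α)) (g : α → β) (k : String) :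
    (PySem.Dict.mk (l.map (fun p => (p.1, g p.2)))).get? k
      = ((PySem.Dict.mk l).get? k).map g := by
  induction l with
  | nil => simp [PySem.Dict.get?]
  | cons p l ih =>
    simp only [List.map_cons]
    rw [PySem.Dict.get?_mk_cons, PySem.Dict.get?_mk_cons]
    by_cases hp : p.1 = k <;> simp [hp, ih]

-- FMD lemmas
theorem FMD_contains (n : Nat) (r : PVMD) (mt : String) :
    (FMD n r).contains mt = r.contains mt := by
  simp [FMD, PySem.Dict.contains, List.any_map, Function.comp_def]

theorem FMD_getD (n : Nat) (r : PVMD) (mt : String) :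
    (FMD n r).getD mt PySem.Dict.empty = fKD n (r.getD mt PySem.Dict.empty) := by
  simp only [PySem.Dict.getD, FMD]
  rw [pv_get?_mapSnd]
  cases h : (PySem.Dict.mk r.items : PVMD).get? mt <;> simp [fKD, PySem.Dict.empty]

theorem FMD_insert (n : Nat) (r : PVMD) (mt : String) (md : PVKD) :
    FMD n (r.insert mt md) = (FMD n r).insert mt (fKD n md) := by
  cases h : r.contains mt
  · have h2 : (FMD n r).contains mt = false := by rw [FMD_contains]; exact h
    apply PySem.Dict.ext
    rw [PySem.Dict.items_insert_of_not_contains _ _ h2]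
    show ((r.insert mt md).items.map (fun p => (p.1, fKD n p.2))) = _
    rw [PySem.Dict.items_insert_of_not_contains _ _ h, List.map_append]
    rfl
  · have h2 : (FMD n r).contains mt = true := by rw [FMD_contains]; exact h
    apply PySem.Dict.ext
    rw [PySem.Dict.items_insert_of_contains _ _ h2]
    show ((r.insert mt md).items.map (fun p => (p.1, fKD n p.2))) = _
    rw [PySem.Dict.items_insert_of_contains _ _ h]
    show _ = (r.items.map (fun p => (p.1, fKD n p.2))).map _
    rw [List.map_map, List.map_map]
    apply List.map_congr_left
    intro p _
    by_cases hp : p.1 = mt <;> simp [hp]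

theorem FMD_setdefault (n : Nat) (r : PVMD) (mt : String) :
    FMD n (r.setdefault mt PySem.Dict.empty)
      = (FMD n r).setdefault mt PySem.Dict.empty := by
  cases h : r.contains mt
  · have h2 : (FMD n r).contains mt = false := by rw [FMD_contains]; exact h
    apply PySem.Dict.ext
    simp only [PySem.Dict.setdefault, h, h2, Bool.false_eq_true, if_false]
    show ((PySem.Dict.mk (r.items ++ [(mt, PySem.Dict.empty)]) : PVMD).items.map (fun p => (p.1, fKD n p.2))) = _
    rw [List.map_append]
    rfl
  · have h2 : (FMD n r).contains mt = true := by rw [FMD_contains]; exact h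
    simp [PySem.Dict.setdefault, h, h2]

-- fKD lemmas; hprev says: every entry of kd at key k currently passes the filter
theorem pv_get?_filter (n : Nat) (k : String) (l : List (String × PVVD))
    (hprev : ∀ p ∈ l, p.1 = k → keepB n p.2 = true) :
    (PySem.Dict.mk (l.filter (fun q => keepB n q.2))).get? k
      = (PySem.Dict.mk l).get? k := by
  induction l with
  | nil => rfl
  | cons p l ih =>
    have ih' := ih (fun q hq => hprev q (List.mem_cons_of_mem _ hq))
    by_cases hk : keepB n p.2 = true
    · simp only [List.filter_cons, hk, if_true]
      rw [PySem.Dict.get?_mk_cons, PySem.Dict.get?_mk_cons, ih']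
    · have hpk : ¬ p.1 = k := fun hc => hk (hprev p (List.mem_cons_self) hc)
      simp only [List.filter_cons, hk, Bool.false_eq_true, if_false]
      rw [PySem.Dict.get?_mk_cons]
      simp only [ih']
      rw [if_neg (by simpa using hpk)]

theorem fKD_get? (n : Nat) (kd : PVKD) (k : String)
    (hprev : ∀ p ∈ kd.items, p.1 = k → keepB n p.2 = true) :
    (fKD n kd).get? k = kd.get? k :=
  pv_get?_filter n k kd.items hprev

theorem fKD_contains_of_keep (n : Nat) (kd : PVKD) (k : String)
    (hprev : ∀ p ∈ kd.items, p.1 = k → keepB n p.2 = true) :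
    (fKD n kd).contains k = kd.contains k := by
  rw [PySem.Dict.contains_eq_isSome_get?, PySem.Dict.contains_eq_isSome_get?,
    fKD_get? n kd k hprev]

theorem fKD_insert_keep (n : Nat) (kd : PVKD) (k : String) (vd : PVVD)
    (hk : keepB n vd = true)
    (hprev : ∀ p ∈ kd.items, p.1 = k → keepB n p.2 = true) :
    fKD n (kd.insert k vd) = (fKD n kd).insert k vd := by
  cases h : kd.contains k
  · have h2 : (fKD n kd).contains k = false := by
      rw [fKD_contains_of_keep n kd k hprev]; exact h
    apply PySem.Dict.ext
    rw [PySem.Dict.items_insert_of_not_contains _ _ h2]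
    show ((kd.insert k vd).items.filter _) = _
    rw [PySem.Dict.items_insert_of_not_contains _ _ h, List.filter_append]
    simp [fKD, hk]
  · have h2 : (fKD n kd).contains k = true := by
      rw [fKD_contains_of_keep n kd k hprev]; exact h
    apply PySem.Dict.ext
    rw [PySem.Dict.items_insert_of_contains _ _ h2]
    show ((kd.insert k vd).items.filter _) = _
    rw [PySem.Dict.items_insert_of_contains _ _ h]
    show (kd.items.map _).filter _ = (kd.items.filter _).map _
    rw [List.filter_map]
    rw [List.filter_congr (q := fun q => keepB n q.2) (by
      intro p hp
      by_cases hpk : p.1 = k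
      · simp [hpk, hk, hprev p hp hpk]
      · simp [hpk])]

theorem fKD_insert_drop (n : Nat) (kd : PVKD) (k : String) (vd : PVVD)
    (hk : keepB n vd = false) :
    fKD n (kd.insert k vd) = (fKD n kd).erase k := by
  cases h : kd.contains k
  · have hfk : ∀ p ∈ kd.items, (p.1 == k) = false := by
      intro p hp
      by_contra hc
      have : kd.contains k = true := by
        simp only [PySem.Dict.contains, List.any_eq_true]
        exact ⟨p, hp, by simpa using hc⟩
      simp [this] at h
    apply PySem.Dict.ext
    show ((kd.insert k vd).items.filter _) = ((fKD n kd).items.filter _)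
    rw [PySem.Dict.items_insert_of_not_contains _ _ h, List.filter_append]
    show _ ++ ([(k, vd)].filter _) = (kd.items.filter _).filter _
    simp only [List.filter_cons, hk, Bool.false_eq_true, if_false, List.filter_nil,
      List.append_nil]
    rw [List.filter_filter]
    apply List.filter_congr
    intro p hp
    simp [hfk p hp]
  · apply PySem.Dict.ext
    show ((kd.insert k vd).items.filter _) = ((fKD n kd).items.filter _)
    rw [PySem.Dict.items_insert_of_contains _ _ h, List.filter_map]
    rw [List.filter_congr
      (q := fun p : String × PVVD => !(p.1 == k) && keepB n p.2) (by
        intro p hp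
        by_cases hpk : p.1 = k
        · simp [hpk, hk]
        · simp [hpk])]
    rw [List.map_congr_left (g := id) (by
      intro p hp
      have hmem := List.of_mem_filter hp
      have hpk : (p.1 == k) = false := by
        rcases Bool.and_eq_true .. |>.mp hmem with ⟨h1, _⟩
        simpa using h1
      simp [hpk]), List.map_id]
    show _ = ((kd.items.filter (fun q => keepB n q.2)).filter (fun p => !(p.1 == k)))
    rw [List.filter_filter]

-- B's per-module inner fold, lifted to the outer dict
theorem pv_lemB (host mt : String) (pairs : List (String × String)) :
    ∀ r : PVMD, r.contains mt = true → r.keys.Nodup →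
    r.insert mt (pairs.foldl (mdStepB host) (r.getD mt PySem.Dict.empty))
      = pairs.foldl (pairStepP host mt) r := by
  induction pairs with
  | nil =>
    intro r hc hnd
    simpa using pv_insert_getD_self r mt PySem.Dict.empty hc hnd
  | cons kv pairs ih =>
    intro r hc hnd
    simp only [List.foldl_cons]
    have h2 := ih (r.insert mt (mdStepB host (r.getD mt PySem.Dict.empty) kv))
      (PySem.Dict.contains_insert_self _ _ _) (PySem.Dict.nodup_keys_insert _ _ _ hnd)
    rw [PySem.Dict.getD_insert_self, PySem.Dict.insert_insert_self] at h2
    exact h2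

theorem nodAll_getD {r : PVMD} (hnod : NodAll r) (mt : String) :
    (r.getD mt PySem.Dict.empty).keys.Nodup := by
  cases h : r.get? mt with
  | none => simp [PySem.Dict.getD, h, PySem.Dict.empty, PySem.Dict.keys]
  | some kd =>
    have := PySem.Dict.mem_items_of_get?_eq_some r h
    have := hnod.2 _ this
    simpa [PySem.Dict.getD, h] using this

theorem allL_getD {r : PVMD} {b : Nat} (hall : AllL r b) (mt : String) :
    ∀ q ∈ (r.getD mt PySem.Dict.empty).items, ∀ w ∈ q.2.items, w.2.length ≤ b := by
  cases h : r.get? mt with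
  | none => simp [PySem.Dict.getD, h, PySem.Dict.empty]
  | some kd =>
    have hm := PySem.Dict.mem_items_of_get?_eq_some r h
    intro q hq w hw
    exact hall _ hm q (by simpa [PySem.Dict.getD, h] using hq) w hw

theorem len_getD_le {vd0 : PVVD} {m : Nat} (h : ∀ q ∈ vd0.items, q.2.length ≤ m)
    (x : String) : (vd0.getD x []).length ≤ m := by
  cases hg : vd0.get? x with
  | none => simp [PySem.Dict.getD, hg]
  | some l =>
    have := PySem.Dict.mem_items_of_get?_eq_some vd0 hg
    simpa [PySem.Dict.getD, hg] using h _ this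

-- the single-pair step of A, performed on the filtered state
theorem pairA_step (n m : Nat) (host mt : String) (kv : String × String) (r : PVMD)
    (hnod : NodAll r) (hm : m + 1 ≤ n)
    (hvd : ∀ q ∈ ((r.getD mt PySem.Dict.empty).getD kv.1 PySem.Dict.empty).items,
      q.2.length ≤ m) :
    pairStepA n host mt (FMD n r) kv = FMD n (pairStepP host mt r kv) := by
  have hndkd : (r.getD mt PySem.Dict.empty).keys.Nodup := nodAll_getD hnod mt
  have hprev : ∀ p ∈ (r.getD mt PySem.Dict.empty).items, p.1 = kv.1 → keepB n p.2 = true := by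
    intro p hp hpk
    have hg : (r.getD mt PySem.Dict.empty).get? kv.1 = some p.2 :=
      PySem.Dict.get?_of_mem_items _ (by rw [← hpk]; exact hp) hndkd
    have hp2 : ((r.getD mt PySem.Dict.empty).getD kv.1 PySem.Dict.empty) = p.2 :=
      PySem.Dict.getD_of_get?_eq_some _ _ hg
    simp only [keepB, PySem.Dict.values, List.all_eq_true]
    intro l hl
    rcases List.mem_map.mp hl with ⟨q, hq, rfl⟩
    have := hvd q (by rw [hp2]; exact hq)
    simp only [decide_eq_true_eq]
    omega
  have hfget : (fKD n (r.getD mt PySem.Dict.empty)).getD kv.1 PySem.Dict.empty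
      = (r.getD mt PySem.Dict.empty).getD kv.1 PySem.Dict.empty := by
    have h2 := fKD_get? n (r.getD mt PySem.Dict.empty) kv.1 hprev
    rw [PySem.Dict.getD_eq_get?_getD, h2, ← PySem.Dict.getD_eq_get?_getD]
  have hlst : ((((r.getD mt PySem.Dict.empty).getD kv.1 PySem.Dict.empty).getD kv.2 [])
      ++ [host]).length ≤ m + 1 := by
    have := len_getD_le hvd kv.2
    simp only [List.length_append, List.length_cons, List.length_nil]
    omega
  simp only [pairStepA, pairStepP, mdStepB, FMD_getD, PySem.Dict.getD_setdefault_self,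
    hfget, pv_setdefault_insert_self, PySem.Dict.insert_insert_self, FMD_insert]
  by_cases hful : ((((r.getD mt PySem.Dict.empty).getD kv.1 PySem.Dict.empty).getD kv.2 [])
      ++ [host]).length = n
  · rw [if_pos hful]
    have hkeep : keepB n (((r.getD mt PySem.Dict.empty).getD kv.1 PySem.Dict.empty).insert kv.2
        ((((r.getD mt PySem.Dict.empty).getD kv.1 PySem.Dict.empty).getD kv.2 []) ++ [host]))
        = false := by
      apply Bool.not_eq_true _ |>.mp
      simp only [keepB, PySem.Dict.values, List.all_eq_true, not_forall]
      refine ⟨_, List.mem_map.mpr ⟨_, PySem.Dict.mem_items_insert_self _ kv.2 _, rfl⟩, ?_⟩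
      simp [hful]
    rw [PySem.Dict.getD_insert_self, pv_erase_insert_self, fKD_insert_drop _ _ _ _ hkeep]
  · rw [if_neg hful]
    have hkeep : keepB n (((r.getD mt PySem.Dict.empty).getD kv.1 PySem.Dict.empty).insert kv.2
        ((((r.getD mt PySem.Dict.empty).getD kv.1 PySem.Dict.empty).getD kv.2 []) ++ [host]))
        = true := by
      simp only [keepB, PySem.Dict.values, List.all_eq_true]
      intro l hl
      rcases List.mem_map.mp hl with ⟨q, hq, rfl⟩
      rcases (PySem.Dict.mem_items_insert _ _ _ _).mp hq with h1 | ⟨h2, _⟩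
      · simp only [h1, decide_eq_true_eq]
        omega
      · have hle := hvd q h2
        simp only [decide_eq_true_eq]
        omega
    rw [fKD_insert_keep _ _ _ _ hkeep hprev]

-- the fused per-pair loop lemma
theorem pairs_loop (n m : Nat) (host mt : String) (pairs : List (String × String)) :
    ∀ r : PVMD, NodAll r → (pairs.map Prod.fst).Nodup → m + 1 ≤ n →
    AllL r (m + 1) →
    (∀ kv ∈ pairs, ∀ q ∈ ((r.getD mt PySem.Dict.empty).getD kv.1 PySem.Dict.empty).items,
        q.2.length ≤ m) →
    pairs.foldl (pairStepA n host mt) (FMD n r) = FMD n (pairs.foldl (pairStepP host mt) r)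
    ∧ NodAll (pairs.foldl (pairStepP host mt) r)
    ∧ AllL (pairs.foldl (pairStepP host mt) r) (m + 1)
    ∧ ∀ mt' : String, mt' ≠ mt →
        (pairs.foldl (pairStepP host mt) r).get? mt' = r.get? mt' := by
  induction pairs with
  | nil =>
    intro r hnod _ _ hall _
    exact ⟨rfl, hnod, hall, fun _ _ => rfl⟩
  | cons kv pairs ih =>
    intro r hnod hndp hm hall hrem
    rw [List.map_cons] at hndp
    have hndp' := List.nodup_cons.mp hndp
    have hvd : ∀ q ∈ ((r.getD mt PySem.Dict.empty).getD kv.1 PySem.Dict.empty).items,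
        q.2.length ≤ m := hrem kv List.mem_cons_self
    have hstep := pairA_step n m host mt kv r hnod hm hvd
    have hndkd : (r.getD mt PySem.Dict.empty).keys.Nodup := nodAll_getD hnod mt
    have hr'eq : pairStepP host mt r kv
        = r.insert mt ((r.getD mt PySem.Dict.empty).insert kv.1
            (((r.getD mt PySem.Dict.empty).getD kv.1 PySem.Dict.empty).insert kv.2
              ((((r.getD mt PySem.Dict.empty).getD kv.1 PySem.Dict.empty).getD kv.2 [])
                ++ [host]))) := rfl
    have hnod' : NodAll (pairStepP host mt r kv) := by
      constructor
      · rw [hr'eq]; exact PySem.Dict.nodup_keys_insert _ _ _ hnod.1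
      · intro p hp
        rw [hr'eq] at hp
        rcases (PySem.Dict.mem_items_insert _ _ _ _).mp hp with hp1 | ⟨hp2, _⟩
        · rw [hp1]; exact PySem.Dict.nodup_keys_insert _ _ _ hndkd
        · exact hnod.2 _ hp2
    have hlst : ((((r.getD mt PySem.Dict.empty).getD kv.1 PySem.Dict.empty).getD kv.2 [])
        ++ [host]).length ≤ m + 1 := by
      have := len_getD_le hvd kv.2
      simp only [List.length_append, List.length_cons, List.length_nil]
      omega
    have hall' : AllL (pairStepP host mt r kv) (m + 1) := by
      intro p hp q hq w hw
      rw [hr'eq] at hp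
      rcases (PySem.Dict.mem_items_insert _ _ _ _).mp hp with hp1 | ⟨hp2, _⟩
      · rw [hp1] at hq
        rcases (PySem.Dict.mem_items_insert _ _ _ _).mp hq with hq1 | ⟨hq2, _⟩
        · rw [hq1] at hw
          rcases (PySem.Dict.mem_items_insert _ _ _ _).mp hw with hw1 | ⟨hw2, _⟩
          · rw [hw1]; exact hlst
          · have := hvd w hw2; omega
        · exact allL_getD hall mt q hq2 w hw
      · exact hall p hp2 q hq w hw
    have hrem' : ∀ kv' ∈ pairs,
        ∀ q ∈ (((pairStepP host mt r kv).getD mt PySem.Dict.empty).getD kv'.1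
          PySem.Dict.empty).items, q.2.length ≤ m := by
      intro kv' hkv' q hq
      rw [hr'eq, PySem.Dict.getD_insert_self] at hq
      have hne : kv'.1 ≠ kv.1 := by
        intro hc
        exact hndp'.1 (by rw [← hc]; exact List.mem_map_of_mem hkv')
      rw [PySem.Dict.getD_insert_of_ne _ _ _ hne] at hq
      exact hrem kv' (List.mem_cons_of_mem _ hkv') q hq
    obtain ⟨e1, e2, e3, e4⟩ := ih (pairStepP host mt r kv) hnod' hndp'.2 hm hall' hrem'
    simp only [List.foldl_cons]
    refine ⟨?_, e2, e3, ?_⟩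
    · rw [hstep]; exact e1
    · intro mt' hne
      rw [e4 mt' hne, hr'eq, PySem.Dict.get?_insert_of_ne _ _ hne]

-- the fused per-host (module) loop lemma
theorem pv_nodup_keys_setdefault {ν : Type} (d : PySem.Dict String ν) (k : String) (v : ν)
    (h : d.keys.Nodup) : (d.setdefault k v).keys.Nodup := by
  rw [PySem.Dict.keys_setdefault]
  split_ifs with hc
  · exact h
  · have hk : k ∉ d.keys := fun hm => by
      rw [← PySem.Dict.contains_iff_mem_keys] at hm; simp [hm] at hc
    simp only [List.nodup_append, List.nodup_singleton, true_and, h]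
    intro a ha b hb
    simp only [List.mem_singleton] at hb
    intro hab
    apply hk
    rw [← hb, ← hab]
    exact ha

theorem remKD {kd : PVKD} {m : Nat}
    (h : ∀ q ∈ kd.items, ∀ w ∈ q.2.items, w.2.length ≤ m) (k : String) :
    ∀ w ∈ (kd.getD k PySem.Dict.empty).items, w.2.length ≤ m := by
  cases hg : kd.get? k with
  | none => simp [PySem.Dict.getD, hg, PySem.Dict.empty]
  | some vd =>
    intro w hw
    have hm := PySem.Dict.mem_items_of_get?_eq_some kd hg
    exact h _ hm w (by simpa [PySem.Dict.getD, hg] using hw)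

theorem mod_loop (n m : Nat) (host : String) (mvs : List (String × List (String × String))) :
    ∀ r : PVMD, NodAll r → (mvs.map Prod.fst).Nodup →
    (∀ mv ∈ mvs, (mv.2.map Prod.fst).Nodup) → m + 1 ≤ n →
    AllL r (m + 1) →
    (∀ mv ∈ mvs, ∀ q ∈ (r.getD mv.1 PySem.Dict.empty).items, ∀ w ∈ q.2.items,
        w.2.length ≤ m) →
    mvs.foldl (fun res mv => mv.2.foldl (pairStepA n host mv.1)
        (res.setdefault mv.1 PySem.Dict.empty)) (FMD n r)
      = FMD n (mvs.foldl (modStepP host) r)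
    ∧ mvs.foldl (fun idx mv =>
        let idx' := idx.setdefault mv.1 PySem.Dict.empty
        idx'.insert mv.1 (mv.2.foldl (mdStepB host) (idx'.getD mv.1 PySem.Dict.empty))) r
      = mvs.foldl (modStepP host) r
    ∧ NodAll (mvs.foldl (modStepP host) r)
    ∧ AllL (mvs.foldl (modStepP host) r) (m + 1)
    ∧ ∀ mt' : String, mt' ∉ mvs.map Prod.fst →
        (mvs.foldl (modStepP host) r).get? mt' = r.get? mt' := by
  induction mvs with
  | nil =>
    intro r hnod _ _ _ hall _
    exact ⟨rfl, rfl, hnod, hall, fun _ _ => rfl⟩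
  | cons mv mvs ih =>
    intro r hnod hndm hndk hm hall hremM
    rw [List.map_cons] at hndm
    have hndm' := List.nodup_cons.mp hndm
    have hc0 : (r.setdefault mv.1 PySem.Dict.empty).contains mv.1 = true := by
      rw [PySem.Dict.contains_setdefault]; simp
    have hnod0 : NodAll (r.setdefault mv.1 PySem.Dict.empty) := by
      constructor
      · exact pv_nodup_keys_setdefault _ _ _ hnod.1
      · intro p hp
        cases hc : r.contains mv.1
        · simp only [PySem.Dict.setdefault, hc, Bool.false_eq_true, if_false] at hp
          rcases List.mem_append.mp hp with hp1 | hp2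
          · exact hnod.2 p hp1
          · simp only [List.mem_singleton] at hp2
            rw [hp2]
            simp [PySem.Dict.keys, PySem.Dict.empty]
        · rw [PySem.Dict.setdefault_of_contains r _ hc] at hp
          exact hnod.2 p hp
    have hall0 : AllL (r.setdefault mv.1 PySem.Dict.empty) (m + 1) := by
      intro p hp q hq w hw
      cases hc : r.contains mv.1
      · simp only [PySem.Dict.setdefault, hc, Bool.false_eq_true, if_false] at hp
        rcases List.mem_append.mp hp with hp1 | hp2
        · exact hall p hp1 q hq w hw
        · simp only [List.mem_singleton] at hp2
          rw [hp2] at hq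
          simp [PySem.Dict.empty] at hq
      · rw [PySem.Dict.setdefault_of_contains r _ hc] at hp
        exact hall p hp q hq w hw
    have hrem0 : ∀ kv ∈ mv.2,
        ∀ q ∈ (((r.setdefault mv.1 PySem.Dict.empty).getD mv.1
            PySem.Dict.empty).getD kv.1 PySem.Dict.empty).items,
          q.2.length ≤ m := by
      intro kv _ q hq
      rw [PySem.Dict.getD_setdefault_self] at hq
      exact remKD (hremM mv List.mem_cons_self) kv.1 q hq
    obtain ⟨e1, e2, e3, e4⟩ :=
      pairs_loop n m host mv.1 mv.2 (r.setdefault mv.1 PySem.Dict.empty)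
        hnod0 (hndk mv List.mem_cons_self) hm hall0 hrem0
    have hstepA : mv.2.foldl (pairStepA n host mv.1)
        ((FMD n r).setdefault mv.1 PySem.Dict.empty) = FMD n (modStepP host r mv) := by
      rw [← FMD_setdefault]
      exact e1
    have hstepB : (let idx' := r.setdefault mv.1 PySem.Dict.empty
        idx'.insert mv.1 (mv.2.foldl (mdStepB host) (idx'.getD mv.1 PySem.Dict.empty)))
        = modStepP host r mv := by
      show (r.setdefault mv.1 PySem.Dict.empty).insert mv.1 _ = _
      exact pv_lemB host mv.1 mv.2 _ hc0 hnod0.1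
    have hget1 : ∀ mt' : String, mt' ≠ mv.1 →
        (modStepP host r mv).get? mt' = r.get? mt' := by
      intro mt' hne
      show (mv.2.foldl (pairStepP host mv.1) _).get? mt' = _
      rw [e4 mt' hne, PySem.Dict.get?_setdefault_of_ne _ _ hne]
    have hremM' : ∀ mv' ∈ mvs, ∀ q ∈ ((modStepP host r mv).getD mv'.1
        PySem.Dict.empty).items, ∀ w ∈ q.2.items, w.2.length ≤ m := by
      intro mv' hmv' q hq w hw
      have hne : mv'.1 ≠ mv.1 := by
        intro hc
        exact hndm'.1 (by rw [← hc]; exact List.mem_map_of_mem hmv')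
      rw [PySem.Dict.getD_eq_get?_getD, hget1 mv'.1 hne,
        ← PySem.Dict.getD_eq_get?_getD] at hq
      exact hremM mv' (List.mem_cons_of_mem _ hmv') q hq w hw
    obtain ⟨f1, f2, f3, f4, f5⟩ := ih (modStepP host r mv) e2 hndm'.2
      (fun mv' hmv' => hndk mv' (List.mem_cons_of_mem _ hmv')) hm e3 hremM'
    simp only [List.foldl_cons]
    refine ⟨?_, ?_, f3, f4, ?_⟩
    · rw [hstepA]; exact f1
    · rw [hstepB]; exact f2
    · intro mt' hmem
      rw [List.map_cons, List.mem_cons] at hmem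
      push Not at hmem
      rw [f5 mt' hmem.2, hget1 mt' hmem.1]

-- the outer loop over hosts
theorem host_loop (n : Nat) (hosts : List (String × List (String × List (String × String)))) :
    ∀ (r : PVMD) (m : Nat), NodAll r → m + hosts.length ≤ n → AllL r m →
    (∀ hv ∈ hosts, (hv.2.map Prod.fst).Nodup ∧ ∀ mv ∈ hv.2, (mv.2.map Prod.fst).Nodup) →
    hosts.foldl (fun res hv => hv.2.foldl (fun res mv => mv.2.foldl (pairStepA n hv.1 mv.1)
        (res.setdefault mv.1 PySem.Dict.empty)) res) (FMD n r)
      = FMD n (hosts.foldl (fun r hv => hv.2.foldl (modStepP hv.1) r) r)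
    ∧ hosts.foldl (fun idx hv => hv.2.foldl (fun idx mv =>
        let idx' := idx.setdefault mv.1 PySem.Dict.empty
        idx'.insert mv.1 (mv.2.foldl (mdStepB hv.1) (idx'.getD mv.1 PySem.Dict.empty))) idx) r
      = hosts.foldl (fun r hv => hv.2.foldl (modStepP hv.1) r) r := by
  induction hosts with
  | nil =>
    intro r m _ _ _ _
    exact ⟨rfl, rfl⟩
  | cons hv hosts ih =>
    intro r m hnod hlen hall hpre
    rw [List.length_cons] at hlen
    have hm1 : m + 1 ≤ n := by omega
    have hall' : AllL r (m + 1) := fun p hp q hq w hw =>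
      Nat.le_succ_of_le (hall p hp q hq w hw)
    have hremM : ∀ mv ∈ hv.2, ∀ q ∈ (r.getD mv.1 PySem.Dict.empty).items,
        ∀ w ∈ q.2.items, w.2.length ≤ m := fun mv _ => allL_getD hall mv.1
    obtain ⟨f1, f2, f3, f4, _⟩ := mod_loop n m hv.1 hv.2 r hnod
      (hpre hv List.mem_cons_self).1 (hpre hv List.mem_cons_self).2 hm1 hall' hremM
    obtain ⟨g1, g2⟩ := ih (hv.2.foldl (modStepP hv.1) r) (m + 1) f3 (by omega) f4
      (fun hv' hm' => hpre hv' (List.mem_cons_of_mem _ hm'))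
    simp only [List.foldl_cons]
    constructor
    · rw [f1]; exact g1
    · rw [f2]; exact g2

-- ===== VERDICT (by name: the statement is the Claim_ definition above) =====
theorem compare_hosts_spec : Claim_equal_compare_hosts := by
  intro data _ hpre
  show compare_hosts data = compare_hosts_alt data
  have hnodE : NodAll PySem.Dict.empty :=
    ⟨List.nodup_nil, fun p hp => by simp [PySem.Dict.empty] at hp⟩
  have hallE : AllL PySem.Dict.empty 0 := fun p hp => by simp [PySem.Dict.empty] at hp
  obtain ⟨e1, e2⟩ := host_loop data.length data PySem.Dict.empty 0 hnodE
    (by omega) hallE hpre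
  have hA : compare_hosts data
      = (FMD data.length (data.foldl (fun r hv => hv.2.foldl (modStepP hv.1) r)
          PySem.Dict.empty)).items.map
        (fun p => (p.1, p.2.items.map (fun q => (q.1, q.2.items)))) := by
    show ((data.foldl (fun res hv => hv.2.foldl (fun res mv =>
        mv.2.foldl (pairStepA data.length hv.1 mv.1)
          (res.setdefault mv.1 PySem.Dict.empty)) res)
        (FMD data.length PySem.Dict.empty)).items.map
          (fun p => (p.1, p.2.items.map (fun q => (q.1, q.2.items))))) = _
    rw [e1]
  have hB : compare_hosts_alt data
      = (data.foldl (fun r hv => hv.2.foldl (modStepP hv.1) r)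
          PySem.Dict.empty).items.map
        (fun p => (p.1, (p.2.items.filter
            (fun q => q.2.values.all (fun hosts => hosts.length < data.length))).map
          (fun q => (q.1, q.2.items)))) := by
    show ((data.foldl (fun idx hv => hv.2.foldl (fun idx mv =>
        let idx' := idx.setdefault mv.1 PySem.Dict.empty
        idx'.insert mv.1 (mv.2.foldl (mdStepB hv.1)
          (idx'.getD mv.1 PySem.Dict.empty))) idx) PySem.Dict.empty).items.map
        (fun p => (p.1, (p.2.items.filter
            (fun q => q.2.values.all (fun hosts => hosts.length < data.length))).map
          (fun q => (q.1, q.2.items))))) = _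
    rw [e2]
  rw [hA, hB]
  show (((data.foldl (fun r hv => hv.2.foldl (modStepP hv.1) r)
      PySem.Dict.empty).items.map (fun p => (p.1, fKD data.length p.2))).map
        (fun p => (p.1, p.2.items.map (fun q => (q.1, q.2.items))))) = _
  rw [List.map_map]
  apply List.map_congr_left
  intro p _
  rfl
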